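-- pv_equiv track=rewrite | github.com/Dixith-ai/Learning-Python | _files/advanced/valid_number_string.py | is_valid_number_with_optimization
-- ===== SOURCE A (Python) =====
-- def is_valid_number_with_optimization(s):
--     s = s.strip()
--     if not s:
--         return False
--
--     has_digit = False
--     has_dot = False
--     has_e = False
--
--     for i, char in enumerate(s):
--         if char.isdigit():
--             has_digit = True
--         elif char == '.':
--             if has_dot or has_e:
--                 return False
--             has_dot = True
--         elif char in 'eE':
--             if has_e or not has_digit:
--                 return False
--             has_e = True
--             has_digit = False
--         elif char in '+-':
--             if i != 0 and s[i-1] not in 'eE':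
--                 return False
--         else:
--             return False
--
--     return has_digit
-- ===== SOURCE B (Python) =====
-- def _unsigned(t):
--     return t[1:] if t[:1] in ('+', '-') else t
--
-- def _mant_ok(mant):
--     m = _unsigned(mant)
--     dots = m.count('.')
--     return dots <= 1 and len(m) > dots and all(c == '.' or c.isdigit() for c in m)
--
-- def is_valid_number_with_optimization(s):
--     low = s.strip().lower()
--     mant, sep, exp = low.partition('e')
--     if 'e' in exp:
--         return False
--     return _mant_ok(mant) and (not sep or _unsigned(exp).isdigit())
-- ===== Notes on version B (the rewrite author's own statement) =====
-- stated objective: idiomatic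
-- what changed: Replaces A's single-pass state machine (three mutable flags plus an index-based look-back for signs) by a declarative decomposition: strip and lowercase, split once at the exponent marker, then validate the mantissa (optional sign, at most one dot, at least one digit, only dots/digits) and the optional exponent (optional sign, nonempty digits) with independent passes.
import Mathlib
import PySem

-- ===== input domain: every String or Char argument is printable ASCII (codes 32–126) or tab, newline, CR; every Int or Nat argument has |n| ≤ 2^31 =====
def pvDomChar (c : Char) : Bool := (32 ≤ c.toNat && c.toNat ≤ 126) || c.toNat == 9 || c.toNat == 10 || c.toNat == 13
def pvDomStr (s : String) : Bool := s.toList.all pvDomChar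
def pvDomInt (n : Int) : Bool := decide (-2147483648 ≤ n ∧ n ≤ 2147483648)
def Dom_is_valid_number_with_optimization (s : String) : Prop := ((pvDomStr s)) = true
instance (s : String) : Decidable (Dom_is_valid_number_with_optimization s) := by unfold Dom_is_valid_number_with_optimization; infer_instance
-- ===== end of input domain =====

-- B replaces A's flag-juggling state machine by a declarative split at the (single) exponent
-- marker with two small validation passes (objective: simpler/idiomatic, same cost).

-- ===== PORT A =====
-- A's for-loop over enumerate(s) with its three flags; s[i-1] is PySem.List.pyGet? (i ≥ 1 in that branch, so it never raises)
def pvLoopA (s : List Char) : List (Int × Char) → Bool → Bool → Bool → Bool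
  | [], hd, _, _ => hd
  | (i, c) :: rest, hd, hdot, he =>
    if PySem.Chars.isdigit c then pvLoopA s rest true hdot he
    else if c = '.' then
      if hdot || he then false else pvLoopA s rest hd true he
    else if c = 'e' ∨ c = 'E' then
      if he || !hd then false else pvLoopA s rest false hdot true
    else if c = '+' ∨ c = '-' then
      if i ≠ 0 ∧ PySem.List.pyGet? s (i - 1) ≠ some 'e' ∧ PySem.List.pyGet? s (i - 1) ≠ some 'E'
      then false else pvLoopA s rest hd hdot he
    else false

def is_valid_number_with_optimization (s : String) : Bool :=
  let t := PySem.Chars.strip s.toList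
  if t.isEmpty then false
  else pvLoopA t (PySem.List.enumerate t 0) false false false

-- ===== PORT B =====
-- _unsigned: t[1:] if t[:1] in ('+','-') else t
def pvUnsigned (t : List Char) : List Char :=
  if t.take 1 = ['+'] ∨ t.take 1 = ['-'] then t.drop 1 else t

-- _mant_ok: after an optional sign, at most one dot, more chars than dots, only dots/digits
def pvMantOk (mant : List Char) : Bool :=
  let m := pvUnsigned mant
  let dots := m.count '.'
  decide (dots ≤ 1) && decide (dots < m.length) && m.all (fun c => c == '.' || PySem.Chars.isdigit c)

-- low.partition('e') is ported by hand as takeWhile/dropWhile at the first 'e' (exact: 1-char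
-- separator); `'e' in exp` for a 1-char needle is list membership (List.contains)
def is_valid_number_with_optimization_alt (s : String) : Bool :=
  let low := PySem.Chars.lower (PySem.Chars.strip s.toList)
  let mant := low.takeWhile (fun c => !(c == 'e'))
  match low.dropWhile (fun c => !(c == 'e')) with
  | [] => pvMantOk mant
  | _ :: exp =>
    if exp.contains 'e' then false
    else pvMantOk mant && PySem.Chars.strIsdigit (pvUnsigned exp)

-- ===== PRECONDITION & SPEC =====
def Spec_is_valid_number_with_optimization (s : String) (out : Bool) : Prop := out = is_valid_number_with_optimization_alt s
instance (s : String) (out : Bool) : Decidable (Spec_is_valid_number_with_optimization s out) := by unfold Spec_is_valid_number_with_optimization; infer_instance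

-- ===== CLAIM (what is proved, stated in full; the proofs are below) =====
def Claim_equal_is_valid_number_with_optimization : Prop := ∀ (s : String), Dom_is_valid_number_with_optimization s → Spec_is_valid_number_with_optimization s (is_valid_number_with_optimization s)

-- ===== LEMMAS AND PROOFS =====

-- A's loop with the index/prev-char sign test replaced by one Bool: "a sign is allowed here"
def pvLoopA' : Bool → List Char → Bool → Bool → Bool → Bool
  | _, [], hd, _, _ => hd
  | sa, c :: r, hd, hdot, he =>
    if PySem.Chars.isdigit c then pvLoopA' false r true hdot he
    else if c = '.' then
      if hdot || he then false else pvLoopA' false r hd true he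
    else if c = 'e' ∨ c = 'E' then
      if he || !hd then false else pvLoopA' true r false hdot true
    else if c = '+' ∨ c = '-' then
      if !sa then false else pvLoopA' false r hd hdot he
    else false

def pvOnlyDigits (hd : Bool) (r : List Char) : Bool :=
  r.all PySem.Chars.isdigit && (hd || !r.isEmpty)

-- A's loop restricted to mantissa characters (the lists fed to it contain no e/E)
def pvMantGen : Bool → Bool → Bool → List Char → Bool
  | _, hd, _, [] => hd
  | sa, hd, hdot, c :: r =>
    if PySem.Chars.isdigit c then pvMantGen false true hdot r
    else if c = '.' then
      if hdot then false else pvMantGen false hd true r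
    else if c = '+' ∨ c = '-' then sa && pvMantGen false hd hdot r
    else false

-- character facts about lowerChar, by enumeration of the 91 relevant codes
lemma pv_upper_bound (c : Char) (h : PySem.Chars.isupper c = true) : c.toNat < 91 := by
  simp only [PySem.Chars.isupper, Bool.and_eq_true, decide_eq_true_eq] at h
  have h2 := h.2
  rw [Char.le_def] at h2
  have h3 := UInt32.le_iff_toNat_le.mp h2
  have hz : ('Z' : Char).val.toNat = 90 := rfl
  simp only [Char.toNat] at *
  omega

lemma pv_lower_of_not_upper (c : Char) (h : ¬ PySem.Chars.isupper c = true) :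
    PySem.Chars.lowerChar c = c := by
  simp [PySem.Chars.lowerChar, h]

lemma pv_cf1 (c : Char) : PySem.Chars.isdigit (PySem.Chars.lowerChar c) = PySem.Chars.isdigit c := by
  by_cases h : PySem.Chars.isupper c = true
  · have key : ∀ n : Nat, n < 91 → PySem.Chars.isdigit (PySem.Chars.lowerChar (Char.ofNat n)) = PySem.Chars.isdigit (Char.ofNat n) := by decide
    have := key c.toNat (pv_upper_bound c h)
    rwa [Char.ofNat_toNat] at this
  · rw [pv_lower_of_not_upper c h]

lemma pv_cf2 (c : Char) : (PySem.Chars.lowerChar c = '.') ↔ (c = '.') := by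
  by_cases h : PySem.Chars.isupper c = true
  · have key : ∀ n : Nat, n < 91 → ((PySem.Chars.lowerChar (Char.ofNat n) = '.') ↔ (Char.ofNat n = '.')) := by decide
    have := key c.toNat (pv_upper_bound c h)
    rwa [Char.ofNat_toNat] at this
  · rw [pv_lower_of_not_upper c h]

lemma pv_cf3 (c : Char) : (PySem.Chars.lowerChar c = 'e' ∨ PySem.Chars.lowerChar c = 'E') ↔ (c = 'e' ∨ c = 'E') := by
  by_cases h : PySem.Chars.isupper c = true
  · have key : ∀ n : Nat, n < 91 → ((PySem.Chars.lowerChar (Char.ofNat n) = 'e' ∨ PySem.Chars.lowerChar (Char.ofNat n) = 'E') ↔ (Char.ofNat n = 'e' ∨ Char.ofNat n = 'E')) := by decide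
    have := key c.toNat (pv_upper_bound c h)
    rwa [Char.ofNat_toNat] at this
  · rw [pv_lower_of_not_upper c h]

lemma pv_cf4 (c : Char) : (PySem.Chars.lowerChar c = '+' ∨ PySem.Chars.lowerChar c = '-') ↔ (c = '+' ∨ c = '-') := by
  by_cases h : PySem.Chars.isupper c = true
  · have key : ∀ n : Nat, n < 91 → ((PySem.Chars.lowerChar (Char.ofNat n) = '+' ∨ PySem.Chars.lowerChar (Char.ofNat n) = '-') ↔ (Char.ofNat n = '+' ∨ Char.ofNat n = '-')) := by decide
    have := key c.toNat (pv_upper_bound c h)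
    rwa [Char.ofNat_toNat] at this
  · rw [pv_lower_of_not_upper c h]

lemma pv_cf5 (c : Char) : PySem.Chars.lowerChar c ≠ 'E' := by
  by_cases h : PySem.Chars.isupper c = true
  · have key : ∀ n : Nat, n < 91 → PySem.Chars.lowerChar (Char.ofNat n) ≠ 'E' := by decide
    have := key c.toNat (pv_upper_bound c h)
    rwa [Char.ofNat_toNat] at this
  · rw [pv_lower_of_not_upper c h]
    intro hc
    rw [hc] at h
    exact h (by decide)

lemma pv_digit_ne (c : Char) (h : PySem.Chars.isdigit c = true) :
    c ≠ '.' ∧ c ≠ '+' ∧ c ≠ '-' ∧ c ≠ 'e' ∧ c ≠ 'E' := by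
  refine ⟨?_, ?_, ?_, ?_, ?_⟩ <;> rintro rfl <;> exact absurd h (by decide)

-- s[i-1] at the head of the suffix, with i = len(p) ≥ 1, reads the last char of the prefix p
lemma pv_pyGet_last (p rest : List Char) (hp : p ≠ []) :
    PySem.List.pyGet? (p ++ rest) ((p.length : Int) - 1) = p.getLast? := by
  have hlen : 1 ≤ p.length := List.length_pos_iff.mpr hp
  have h1 : ((p.length : Int) - 1) = ((p.length - 1 : Nat) : Int) := by omega
  rw [h1, PySem.List.pyGet?_natCast, List.getElem?_append_left (by omega), List.getLast?_eq_getElem?]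

-- STEP 1: A's enumerate/pyGet? loop equals the sign-allowed loop
lemma pv_loopA_eq (r : List Char) : ∀ (p : List Char) (hd hdot he : Bool),
    pvLoopA (p ++ r) (PySem.List.enumerate r (p.length : Int)) hd hdot he
    = pvLoopA' (decide (p = []) || decide (p.getLast? = some 'e') || decide (p.getLast? = some 'E')) r hd hdot he := by
  induction r with
  | nil => intro p hd hdot he; rfl
  | cons c r ih =>
    intro p hd hdot he
    rw [PySem.List.enumerate_cons]
    have hstep : ∀ hd' hdot' he',
        pvLoopA (p ++ c :: r) (PySem.List.enumerate r ((p.length : Int) + 1)) hd' hdot' he'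
        = pvLoopA' (decide (c = 'e') || decide (c = 'E')) r hd' hdot' he' := by
      intro hd' hdot' he'
      have hassoc : p ++ c :: r = (p ++ [c]) ++ r := by simp
      have hlen : ((p ++ [c]).length : Int) = (p.length : Int) + 1 := by simp
      rw [hassoc, ← hlen, ih (p ++ [c]) hd' hdot' he']
      simp
    simp only [pvLoopA, pvLoopA', hstep]
    by_cases h1 : PySem.Chars.isdigit c = true
    · obtain ⟨_, _, _, h4, h5⟩ := pv_digit_ne c h1
      simp [h1, h4, h5]
    · simp only [h1, if_false, Bool.false_eq_true]
      by_cases h2 : c = '.'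
      · simp [h2]
      · by_cases h3 : c = 'e' ∨ c = 'E'
        · have : (decide (c = 'e') || decide (c = 'E')) = true := by
            rcases h3 with h | h <;> simp [h]
          simp [h2, h3, this]
        · by_cases h4 : c = '+' ∨ c = '-'
          · have hce : (decide (c = 'e') || decide (c = 'E')) = false := by
              obtain ⟨h3a, h3b⟩ := not_or.mp h3; simp [h3a, h3b]
            simp only [h2, if_false, h3, if_false, h4, if_true, hce]
            by_cases hp : p = []
            · subst hp
              simp
            · have hlast := pv_pyGet_last p (c :: r) hp
              have hne : ((p.length : Int)) ≠ 0 := by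
                have : 1 ≤ p.length := List.length_pos_iff.mpr hp
                omega
              simp only [List.cons_append] at hlast ⊢
              by_cases hg1 : p.getLast? = some 'e'
              · simp [hp, hne, hg1, hlast]
              · by_cases hg2 : p.getLast? = some 'E'
                · simp [hp, hne, hg1, hg2, hlast]
                · simp [hp, hne, hg1, hg2, hlast]
          · simp [h1, h2, h3, h4]

-- lowercasing is invisible to the loop
lemma pv_loopA'_lower (r : List Char) : ∀ (sa hd hdot he : Bool),
    pvLoopA' sa (PySem.Chars.lower r) hd hdot he = pvLoopA' sa r hd hdot he := by
  induction r with
  | nil => intro sa hd hdot he; rfl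
  | cons c r ih =>
    intro sa hd hdot he
    have hmap : PySem.Chars.lower (c :: r) = PySem.Chars.lowerChar c :: PySem.Chars.lower r := rfl
    rw [hmap]
    simp only [pvLoopA', pv_cf1 c, ih]
    by_cases h1 : PySem.Chars.isdigit c = true
    · simp [h1]
    · simp only [h1, Bool.false_eq_true, if_false]
      by_cases h2 : c = '.'
      · simp [h2, show PySem.Chars.lowerChar '.' = '.' from rfl]
      · rw [if_neg (fun hh => h2 ((pv_cf2 c).mp hh)), if_neg h2]
        by_cases h3 : c = 'e' ∨ c = 'E'
        · rw [if_pos ((pv_cf3 c).mpr h3), if_pos h3]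
        · rw [if_neg (fun hh => h3 ((pv_cf3 c).mp hh)), if_neg h3]
          by_cases h4 : c = '+' ∨ c = '-'
          · rw [if_pos ((pv_cf4 c).mpr h4), if_pos h4]
          · rw [if_neg (fun hh => h4 ((pv_cf4 c).mp hh)), if_neg h4]

-- after the e: only digits may follow
lemma pv_afterE_false (r : List Char) : ∀ (hd hdot : Bool),
    pvLoopA' false r hd hdot true = pvOnlyDigits hd r := by
  induction r with
  | nil => intro hd hdot; simp [pvLoopA', pvOnlyDigits]
  | cons c r ih =>
    intro hd hdot
    simp only [pvLoopA', pvOnlyDigits, List.all_cons, List.isEmpty_cons]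
    by_cases h1 : PySem.Chars.isdigit c = true
    · simp [h1, ih, pvOnlyDigits]
    · by_cases h2 : c = '.'
      · simp [h2, show PySem.Chars.isdigit '.' = false from rfl]
      · by_cases h3 : c = 'e' ∨ c = 'E'
        · simp [h1, h2, h3]
        · by_cases h4 : c = '+' ∨ c = '-'
          · simp [h1, h2, h3, h4]
          · simp [h1, h2, h3, h4]

lemma pv_afterE_entry (exp : List Char) (hdot : Bool) :
    pvLoopA' true exp false hdot true = PySem.Chars.strIsdigit (pvUnsigned exp) := by
  cases exp with
  | nil => simp [pvLoopA', pvUnsigned, PySem.Chars.strIsdigit]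
  | cons c r =>
    simp only [pvLoopA']
    by_cases h1 : PySem.Chars.isdigit c = true
    · obtain ⟨_, hp, hm, _, _⟩ := pv_digit_ne c h1
      have hu : pvUnsigned (c :: r) = c :: r := by
        simp [pvUnsigned, hp, hm]
      rw [hu]
      simp [h1, pv_afterE_false, pvOnlyDigits, PySem.Chars.strIsdigit]
    · by_cases h2 : c = '.'
      · simp [h2, pvUnsigned, PySem.Chars.strIsdigit, show PySem.Chars.isdigit '.' = false from rfl]
      · by_cases h3 : c = 'e' ∨ c = 'E'
        · have hu : pvUnsigned (c :: r) = c :: r := by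
            rcases h3 with h | h <;> simp [pvUnsigned, h]
          have hd : PySem.Chars.isdigit c = false := by
            rcases h3 with h | h <;> (rw [h]; rfl)
          simp [h1, h2, h3, hu, PySem.Chars.strIsdigit, hd]
        · by_cases h4 : c = '+' ∨ c = '-'
          · have hu : pvUnsigned (c :: r) = r := by
              rcases h4 with h | h <;> simp [pvUnsigned, h]
            simp [h1, h2, h3, h4, hu, pv_afterE_false, pvOnlyDigits, PySem.Chars.strIsdigit, Bool.and_comm]
          · have hu : pvUnsigned (c :: r) = c :: r := by
              obtain ⟨h4a, h4b⟩ := not_or.mp h4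
              simp [pvUnsigned, h4a, h4b]
            simp [h1, h2, h3, h4, hu, PySem.Chars.strIsdigit]

-- STEP 2: the scan splits at the first e/E into a mantissa part and an exponent part
lemma pv_preE (r : List Char) : ∀ (sa hd hdot : Bool),
    pvLoopA' sa r hd hdot false
    = (pvMantGen sa hd hdot (r.takeWhile (fun c => !(c == 'e' || c == 'E'))) &&
       match r.dropWhile (fun c => !(c == 'e' || c == 'E')) with
       | [] => true
       | _ :: exp => PySem.Chars.strIsdigit (pvUnsigned exp)) := by
  induction r with
  | nil => intro sa hd hdot; simp [pvLoopA', pvMantGen]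
  | cons c r ih =>
    intro sa hd hdot
    by_cases h3 : c = 'e' ∨ c = 'E'
    · have hpred : (fun c => !(c == 'e' || c == 'E')) c = false := by
        rcases h3 with h | h <;> simp [h]
      have hdig : PySem.Chars.isdigit c = false := by
        rcases h3 with h | h <;> (rw [h]; rfl)
      have hdot2 : c ≠ '.' := by rcases h3 with h | h <;> (rw [h]; decide)
      rw [List.takeWhile_cons_of_neg (by simp [hpred]), List.dropWhile_cons_of_neg (by simp [hpred])]
      simp only [pvLoopA', hdig, Bool.false_eq_true, if_false, hdot2, h3, if_true, if_false,
        Bool.false_or, pvMantGen, pv_afterE_entry]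
      cases hd <;> simp
    · have hpred : (fun c => !(c == 'e' || c == 'E')) c = true := by
        obtain ⟨h3a, h3b⟩ := not_or.mp h3
        simp [h3a, h3b]
      rw [List.takeWhile_cons_of_pos (by simp [hpred]), List.dropWhile_cons_of_pos (by simp [hpred])]
      by_cases h1 : PySem.Chars.isdigit c = true
      · simp only [pvLoopA', pvMantGen, h1, if_true, ih]
      · by_cases h2 : c = '.'
        · simp only [pvLoopA', pvMantGen, h1, Bool.false_eq_true, if_false, h2, if_true,
            Bool.or_false, ih]
          cases hdot <;> simp [show PySem.Chars.isdigit '.' = false from rfl]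
        · by_cases h4 : c = '+' ∨ c = '-'
          · simp only [pvLoopA', pvMantGen, h1, Bool.false_eq_true, if_false, h2, if_false,
              h3, h4, if_true, ih]
            cases sa <;> simp
          · simp [pvLoopA', pvMantGen, h1, h2, h3, h4]

-- among dot/digit chars: "a digit occurs" = "fewer dots than chars"
lemma pv_countN (r : List Char) (h : r.all (fun c => c == '.' || PySem.Chars.isdigit c) = true) :
    r.any PySem.Chars.isdigit = decide (r.count '.' < r.length) := by
  induction r with
  | nil => simp
  | cons c r ih =>
    simp only [List.all_cons, Bool.and_eq_true] at h
    obtain ⟨hc, hr⟩ := h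
    simp only [List.any_cons, List.count_cons, List.length_cons]
    rcases Bool.or_eq_true_iff.mp hc with hdot | hdig
    · have : c = '.' := by simpa using hdot
      subst this
      rw [ih hr]
      simp [show PySem.Chars.isdigit '.' = false from rfl]
    · have hcount : r.count '.' ≤ r.length := List.count_le_length
      have : (c == '.') = false := by
        rcases pv_digit_ne c hdig with ⟨h1, _⟩
        simp [h1]
      simp [hdig, this]
      omega

lemma pv_mantGen_closed (m : List Char) : ∀ (hd hdot : Bool),
    pvMantGen false hd hdot m
    = (decide (m.count '.' + (if hdot then 1 else 0) ≤ 1) && (hd || m.any PySem.Chars.isdigit)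
        && m.all (fun c => c == '.' || PySem.Chars.isdigit c)) := by
  induction m with
  | nil => intro hd hdot; cases hd <;> cases hdot <;> simp [pvMantGen]
  | cons c r ih =>
    intro hd hdot
    by_cases h1 : PySem.Chars.isdigit c = true
    · obtain ⟨hne, _, _, _, _⟩ := pv_digit_ne c h1
      simp only [pvMantGen, h1, if_true, ih, List.count_cons, List.any_cons, List.all_cons]
      simp [hne]
    · by_cases h2 : c = '.'
      · subst h2
        simp only [pvMantGen, show PySem.Chars.isdigit '.' = false from rfl, Bool.false_eq_true,
          if_false, if_true]
        cases hdot
        · simp only [Bool.false_eq_true, if_false, ih, List.count_cons, List.any_cons, List.all_cons]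
          simp [show PySem.Chars.isdigit '.' = false from rfl]
        · simp
      · by_cases h4 : c = '+' ∨ c = '-'
        · have hne : (c == '.') = false := by simp [h2]
          simp [pvMantGen, h1, h2, h4, hne]
        · have hne : (c == '.') = false := by simp [h2]
          simp [pvMantGen, h1, h2, h4, hne]

-- STEP 3: the mantissa scan is B's mantissa check
lemma pv_mantGen_ok (m : List Char) : pvMantGen true false false m = pvMantOk m := by
  cases m with
  | nil => simp [pvMantGen, pvMantOk, pvUnsigned]
  | cons c r =>
    by_cases h1 : PySem.Chars.isdigit c = true
    · obtain ⟨hne, hp, hm, _, _⟩ := pv_digit_ne c h1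
      have hu : pvUnsigned (c :: r) = c :: r := by simp [pvUnsigned, hp, hm]
      have hbe : (c == '.') = false := by simp [hne]
      simp only [pvMantGen, h1, if_true, pv_mantGen_closed, pvMantOk, hu,
        List.count_cons, List.any_cons, List.all_cons, hbe]
      by_cases hall : r.all (fun c => c == '.' || PySem.Chars.isdigit c) = true
      · have hcnt : r.count '.' ≤ r.length := List.count_le_length
        simp [hall]
        omega
      · simp [Bool.eq_false_iff.mpr hall]
    · by_cases h2 : c = '.'
      · subst h2
        have hu : pvUnsigned ('.' :: r) = '.' :: r := by simp [pvUnsigned]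
        simp only [pvMantGen, show PySem.Chars.isdigit '.' = false from rfl, Bool.false_eq_true,
          if_false, if_true, pv_mantGen_closed, pvMantOk, hu, List.count_cons, List.any_cons,
          List.all_cons]
        by_cases hall : r.all (fun c => c == '.' || PySem.Chars.isdigit c) = true
        · rw [pv_countN r hall]
          simp [hall, show PySem.Chars.isdigit '.' = false from rfl]
        · simp [Bool.eq_false_iff.mpr hall, show PySem.Chars.isdigit '.' = false from rfl]
      · by_cases h4 : c = '+' ∨ c = '-'
        · have hu : pvUnsigned (c :: r) = r := by rcases h4 with h | h <;> simp [pvUnsigned, h]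
          simp only [pvMantGen, h1, Bool.false_eq_true, if_false, h2, h4, if_true, Bool.true_and,
            pv_mantGen_closed, pvMantOk, hu]
          by_cases hall : r.all (fun c => c == '.' || PySem.Chars.isdigit c) = true
          · rw [pv_countN r hall]
            simp [hall]
          · simp [Bool.eq_false_iff.mpr hall]
        · have hbe : (c == '.') = false := by simp [h2]
          obtain ⟨h4a, h4b⟩ := not_or.mp h4
          have hu : pvUnsigned (c :: r) = c :: r := by simp [pvUnsigned, h4a, h4b]
          simp [pvMantGen, h1, h2, h4, pvMantOk, hu, hbe]

-- an exponent containing a second e can never pass B's digit test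
lemma pv_exp_e (exp : List Char) (h : 'e' ∈ exp) :
    PySem.Chars.strIsdigit (pvUnsigned exp) = false := by
  have hmem : 'e' ∈ pvUnsigned exp := by
    unfold pvUnsigned
    split
    · rename_i hsp
      cases exp with
      | nil => simpa using h
      | cons c r =>
        rcases List.mem_cons.mp h with rfl | hr
        · rcases hsp with hc | hc <;> simp at hc
        · simpa using hr
    · exact h
  cases hu : pvUnsigned exp with
  | nil => simp [hu] at hmem
  | cons c r =>
    rw [hu] at hmem
    simp only [PySem.Chars.strIsdigit]
    have : ¬ (c :: r).all PySem.Chars.isdigit = true := by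
      intro hall
      have := List.all_eq_true.mp hall _ hmem
      exact absurd this (by decide)
    simp [Bool.eq_false_iff.mpr this]

lemma pv_noE (r : List Char) : 'E' ∉ PySem.Chars.lower r := by
  simp only [PySem.Chars.lower, List.mem_map]
  rintro ⟨c, _, hc⟩
  exact pv_cf5 c hc

lemma pv_takeWhile_noE (r : List Char) (h : 'E' ∉ r) :
    r.takeWhile (fun c => !(c == 'e' || c == 'E')) = r.takeWhile (fun c => !(c == 'e'))
    ∧ r.dropWhile (fun c => !(c == 'e' || c == 'E')) = r.dropWhile (fun c => !(c == 'e')) := by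
  induction r with
  | nil => simp
  | cons c r ih =>
    have hcE : (c == 'E') = false := by
      simp only [List.mem_cons, not_or] at h
      exact beq_eq_false_iff_ne.mpr (fun hh => h.1 hh.symm)
    obtain ⟨ht, hdr⟩ := ih (fun hm => h (List.mem_cons_of_mem _ hm))
    simp only [Bool.not_or] at ht hdr
    by_cases hc : c = 'e'
    · constructor <;> simp [hc]
    · have hce : (c == 'e') = false := by simp [hc]
      constructor
      · rw [List.takeWhile_cons, List.takeWhile_cons]
        simp [hce, hcE, ht]
      · rw [List.dropWhile_cons, List.dropWhile_cons]
        simp [hce, hcE, hdr]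

-- the whole computation, stated over the stripped character list
lemma pv_main (t : List Char) :
    (if t.isEmpty then false else pvLoopA t (PySem.List.enumerate t 0) false false false)
    = (match (PySem.Chars.lower t).dropWhile (fun c => !(c == 'e')) with
       | [] => pvMantOk ((PySem.Chars.lower t).takeWhile (fun c => !(c == 'e')))
       | _ :: exp =>
         if exp.contains 'e' then false
         else pvMantOk ((PySem.Chars.lower t).takeWhile (fun c => !(c == 'e')))
           && PySem.Chars.strIsdigit (pvUnsigned exp)) := by
  by_cases hte : t = []
  · rw [hte]; rfl
  · have hne : t.isEmpty = false := by simp [hte]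
    rw [hne]
    simp only [Bool.false_eq_true, if_false]
    have h0 : pvLoopA t (PySem.List.enumerate t 0) false false false
        = pvLoopA' true t false false false := by
      have := pv_loopA_eq t [] false false false
      simpa using this
    rw [h0, ← pv_loopA'_lower t, pv_preE]
    obtain ⟨htw, hdw⟩ := pv_takeWhile_noE (PySem.Chars.lower t) (pv_noE t)
    rw [htw, hdw, pv_mantGen_ok]
    cases hrest : (PySem.Chars.lower t).dropWhile (fun c => !(c == 'e')) with
    | nil => simp
    | cons c exp =>
      by_cases hce : exp.contains 'e'
      · have := pv_exp_e exp (by simpa using hce)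
        simp [this]
      · have hme : 'e' ∉ exp := by simpa using hce
        simp [hme]

-- ===== VERDICT (by name: the statement is the Claim_ definition above) =====
theorem is_valid_number_with_optimization_spec : Claim_equal_is_valid_number_with_optimization := by
  intro s _
  exact pv_main (PySem.Chars.strip s.toList)
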